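-- pv_equiv track=rewrite | github.com/gesellkammer/emlib | emlib/smooth.py | rm5
-- ===== SOURCE A (Python) =====
-- def rm5(s):
--     temp = map(lambda a,b,c,d,e:
--                [a,b,c,d,e], s[0:-4], s[1:-3], s[2:-2], s[3:-1], s[4:])
--     temp2 = []
--     for x in temp:
--         x.sort()
--         temp2.append(x[1])
--     return temp2
-- ===== SOURCE B (Python) =====
-- def rm5(s):
--     out = []
--     for i in range(len(s) - 4):
--         w = s[i:i+5]
--         m1 = min(w)
--         rest = list(w)
--         rest.remove(m1)
--         out.append(min(rest))
--     return out
-- ===== Notes on version B (the rewrite author's own statement) =====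
-- stated objective: alternative
-- what changed: Per window of 5, B takes the minimum and the minimum of the window with one occurrence of that minimum removed (two linear scans) instead of sorting each window and indexing position 1; windows come from explicit index slicing instead of zipping five shifted slices.
import Mathlib
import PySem

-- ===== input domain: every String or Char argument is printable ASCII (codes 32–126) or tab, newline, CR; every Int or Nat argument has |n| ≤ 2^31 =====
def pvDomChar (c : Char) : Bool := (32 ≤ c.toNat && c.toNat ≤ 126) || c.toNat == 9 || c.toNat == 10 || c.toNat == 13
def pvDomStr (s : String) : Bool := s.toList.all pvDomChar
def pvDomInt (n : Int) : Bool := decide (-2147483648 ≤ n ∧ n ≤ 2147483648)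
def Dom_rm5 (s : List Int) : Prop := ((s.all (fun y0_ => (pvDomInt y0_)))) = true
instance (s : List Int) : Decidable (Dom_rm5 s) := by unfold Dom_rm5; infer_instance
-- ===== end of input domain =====

-- B replaces sorting each 5-window and indexing [1] by two min scans (min, then min after removing
-- one occurrence of the min) over index-addressed windows; objective: alternative (same cost).

-- ===== PORT A =====
-- Python's map over five shifted slices zips them to the shortest: pvZip5 stops as soon as one list is empty.
def pvZip5 : List Int → List Int → List Int → List Int → List Int → List (List Int)
  | a :: as, b :: bs, c :: cs, d :: ds, e :: es => [a, b, c, d, e] :: pvZip5 as bs cs ds es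
  | _, _, _, _, _ => []

-- x[1] in A always hits a 5-element (sorted) window, so pyGet? is always `some`; the .getD 0 default is unreachable.
def rm5 (s : List Int) : List Int :=
  let temp := pvZip5 (PySem.List.slice s (some 0) (some (-4))) (PySem.List.slice s (some 1) (some (-3)))
      (PySem.List.slice s (some 2) (some (-2))) (PySem.List.slice s (some 3) (some (-1)))
      (PySem.List.slice s (some 4) none)
  temp.foldl (fun temp2 x =>
    temp2 ++ [(PySem.List.pyGet? (PySem.List.sorted x (fun y => y) false) 1).getD 0]) []

-- ===== PORT B =====
-- w is a nonempty 5-window and m1 ∈ w, so min?/remove? always return `some`; the .getD defaults are unreachable.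
def rm5_alt (s : List Int) : List Int :=
  (PySem.List.pyRange 0 ((s.length : Int) - 4) 1).foldl (fun out i =>
    let w := PySem.List.slice s (some i) (some (i + 5))
    let m1 := (PySem.List.min? w (fun y => y)).getD 0
    let rest := (PySem.List.remove? w m1).getD []
    out ++ [(PySem.List.min? rest (fun y => y)).getD 0]) []

-- ===== PRECONDITION & SPEC =====
def Spec_rm5 (s : List Int) (out : List Int) : Prop := out = rm5_alt s
instance (s : List Int) (out : List Int) : Decidable (Spec_rm5 s out) := by unfold Spec_rm5; infer_instance

-- ===== CLAIM (what is proved, stated in full; the proofs are below) =====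
def Claim_equal_rm5 : Prop := ∀ (s : List Int), Dom_rm5 s → Spec_rm5 s (rm5 s)

-- ===== LEMMAS AND PROOFS =====

-- s[j:-k] for natural j and positive k with j+k=4 is: drop j, then take (len-4)
theorem pv_slice_jk (s : List Int) (j k : Nat) (hjk : j + k = 4) (hk : 0 < k) :
    PySem.List.slice s (some (j : Int)) (some (-(k : Int))) = (s.drop j).take (s.length - 4) := by
  have ha : PySem.List.clampIdx s.length (j : Int) = min j s.length := by
    simp [PySem.List.clampIdx]
  have hb : PySem.List.clampIdx s.length (-(k : Int)) = s.length - k := by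
    simp [PySem.List.clampIdx]
    split_ifs with h
    · omega
    · omega
  rcases (show j ≤ s.length ∨ s.length < j by omega) with h | h
  · simp [PySem.List.slice, hb]
    rw [min_eq_left h]
    congr 1
    omega
  · simp [PySem.List.slice, hb]
    rw [min_eq_right (le_of_lt h)]
    rw [List.drop_eq_nil_of_le (le_of_lt h), List.drop_length]
    simp

-- A's zipped shifted slices are exactly the index-addressed 5-windows
theorem pv_windows (s : List Int) :
    pvZip5 (s.take (s.length - 4)) ((s.drop 1).take (s.length - 4)) ((s.drop 2).take (s.length - 4))
      ((s.drop 3).take (s.length - 4)) (s.drop 4)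
    = (List.range (s.length - 4)).map (fun i => (s.drop i).take 5) := by
  induction s with
  | nil => simp [pvZip5]
  | cons a t ih =>
    match t with
    | [] => simp [pvZip5]
    | [b] => simp [pvZip5]
    | [b, c] => simp [pvZip5]
    | [b, c, d] => simp [pvZip5]
    | b :: c :: d :: e :: r =>
      have hl : (a :: b :: c :: d :: e :: r).length - 4 = r.length + 1 := by simp
      have hl2 : (b :: c :: d :: e :: r).length - 4 = r.length := by simp
      rw [hl]
      rw [List.range_succ_eq_map]
      simp only [List.drop_succ_cons, List.drop_zero, List.take_succ_cons, List.map_cons,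
        List.map_map]
      rw [pvZip5]
      rw [hl2] at ih
      simp only [List.drop_succ_cons, List.drop_zero] at ih
      rw [ih]
      congr 1

-- second-smallest: sorted[1] = min after removing one occurrence of the min
theorem pv_second (w : List Int) (hw : 2 ≤ w.length) :
    (PySem.List.pyGet? (PySem.List.sorted w (fun y => y) false) 1).getD 0
    = (PySem.List.min? ((PySem.List.remove? w ((PySem.List.min? w (fun y => y)).getD 0)).getD [])
        (fun y => y)).getD 0 := by
  have hperm : (PySem.List.sorted w (fun y => y) false).Perm w := PySem.List.sorted_perm ..
  have hlen : (PySem.List.sorted w (fun y => y) false).length = w.length := hperm.length_eq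
  -- expose the first two elements of the sorted list
  obtain ⟨m, b, r, ht⟩ : ∃ m b r, PySem.List.sorted w (fun y => y) false = m :: b :: r := by
    match h : PySem.List.sorted w (fun y => y) false with
    | [] => rw [h] at hlen; simp at hlen; omega
    | [x] => rw [h] at hlen; simp at hlen; omega
    | m :: b :: r => exact ⟨m, b, r, rfl⟩
  have hpair : (PySem.List.sorted w (fun y => y) false).Pairwise (fun a b => a ≤ b) :=
    PySem.List.sorted_pairwise ..
  rw [ht] at hperm hpair
  -- min? w = some m (the head of the sorted list, up to value)
  have hmw : m ∈ w := hperm.mem_iff.mp (by simp)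
  have hne : w ≠ [] := by intro h; rw [h] at hw; simp at hw
  obtain ⟨m', hm'⟩ : ∃ m', PySem.List.min? w (fun y => y) = some m' := by
    cases h : PySem.List.min? w (fun y => y) with
    | none => exact absurd ((PySem.List.min?_eq_none_iff w (fun y => y)).mp h) hne
    | some x => exact ⟨x, rfl⟩
  have hm'w : m' ∈ w := PySem.List.min?_mem hm'
  have hmin' : ∀ y ∈ w, m' ≤ y := PySem.List.min?_isMin hm'
  have hmle : ∀ y ∈ w, m ≤ y := PySem.List.key_head_sorted_le w (fun y => y) ht
  have hmm : m' = m := le_antisymm (hmin' m hmw) (hmle m' hm'w)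
  -- removing one occurrence of the min leaves a permutation of the sorted tail
  have hrem : PySem.List.remove? w m = some (w.erase m) := PySem.List.remove?_eq_some_erase w m hmw
  have hep : (w.erase m).Perm (b :: r) := by have h := hperm.symm.erase m; simpa using h
  -- min of the rest is b, the second element of the sorted list
  have hne2 : w.erase m ≠ [] := by
    intro h
    have := hep.length_eq
    rw [h] at this; simp at this
  obtain ⟨v, hv⟩ : ∃ v, PySem.List.min? (w.erase m) (fun y => y) = some v := by
    cases h : PySem.List.min? (w.erase m) (fun y => y) with
    | none => exact absurd ((PySem.List.min?_eq_none_iff (w.erase m) (fun y => y)).mp h) hne2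
    | some x => exact ⟨x, rfl⟩
  have hvmem : v ∈ b :: r := hep.mem_iff.mp (PySem.List.min?_mem hv)
  have hble : ∀ y ∈ b :: r, b ≤ y := by
    intro y hy
    rcases List.mem_cons.mp hy with h | h
    · omega
    · exact (List.pairwise_cons.mp (List.pairwise_cons.mp hpair).2).1 y h
  have hvb : v = b := by
    have h1 : v ≤ b := PySem.List.min?_isMin hv b (hep.mem_iff.mpr (by simp))
    exact le_antisymm h1 (hble v hvmem)
  simp [ht, hm', hmm, hrem, hv, hvb]

theorem pv_rm5_eq (s : List Int) : rm5 s = rm5_alt s := by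
  have h0 : PySem.List.slice s (some 0) (some (-4)) = s.take (s.length - 4) := by
    have := pv_slice_jk s 0 4 (by norm_num) (by norm_num); simpa using this
  have h1 : PySem.List.slice s (some 1) (some (-3)) = (s.drop 1).take (s.length - 4) := by
    have := pv_slice_jk s 1 3 (by norm_num) (by norm_num); simpa using this
  have h2 : PySem.List.slice s (some 2) (some (-2)) = (s.drop 2).take (s.length - 4) := by
    have := pv_slice_jk s 2 2 (by norm_num) (by norm_num); simpa using this
  have h3 : PySem.List.slice s (some 3) (some (-1)) = (s.drop 3).take (s.length - 4) := by
    have := pv_slice_jk s 3 1 (by norm_num) (by norm_num); simpa using this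
  have h4 : PySem.List.slice s (some 4) none = s.drop 4 := by
    have := PySem.List.slice_from_natCast s 4; simpa using this
  have htn : (((s.length : Int) - 4) - 0).toNat = s.length - 4 := by omega
  unfold rm5 rm5_alt
  rw [h0, h1, h2, h3, h4, pv_windows, PySem.List.foldl_append_singleton_eq_map,
    PySem.List.pyRange_one, htn, PySem.List.foldl_append_singleton_eq_map]
  simp only [List.map_map, List.nil_append]
  apply List.map_congr_left
  intro i hi
  have hi' : i < s.length - 4 := List.mem_range.mp hi
  have hslice : PySem.List.slice s (some ((0 : Int) + i)) (some ((0 : Int) + i + 5)) = (s.drop i).take 5 := by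
    have := PySem.List.slice_natCast_add s i 5
    simpa using this
  simp only [Function.comp, hslice]
  exact pv_second _ (by simp; omega)

-- ===== VERDICT (by name: the statement is the Claim_ definition above) =====
theorem rm5_spec : Claim_equal_rm5 := by
  intro s _
  unfold Spec_rm5
  exact pv_rm5_eq s
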